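-- pv_equiv track=rewrite | github.com/MrBrantCode/unitest_baseline | mut_generate/mist_train_taco/taco_12930/solution.py | calculate_max_xor_sum
-- ===== SOURCE A (Python) =====
-- def calculate_max_xor_sum(n, k):
--     # If Grisha can take only one candy, the maximum xor-sum is the tastiest candy itself.
--     if k == 1:
--         return n
--
--     # Otherwise, we need to find the maximum xor-sum possible with up to k candies.
--     # The maximum xor-sum is achieved by taking the highest powers of 2 that fit within n.
--     max_xor_sum = 0
--     power = 0
--
--     # Iterate over powers of 2 and add them to the xor-sum if they are within n.
--     while (1 << power) <= n:
--         max_xor_sum += (1 << power)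
--         power += 1
--
--     return max_xor_sum
-- ===== SOURCE B (Python) =====
-- def calculate_max_xor_sum(n, k):
--     if k == 1:
--         return n
--     # Closed form: the loop sums 1,2,4,... up to n's highest set bit,
--     # which is (1 << n.bit_length()) - 1 for positive n, 0 otherwise.
--     return (1 << n.bit_length()) - 1 if n > 0 else 0
-- ===== Notes on version B (the rewrite author's own statement) =====
-- stated objective: idiomatic
-- what changed: Replaced the accumulation loop over powers of two with the closed-form (1 << n.bit_length()) - 1 (0 for n <= 0).
import Mathlib
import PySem

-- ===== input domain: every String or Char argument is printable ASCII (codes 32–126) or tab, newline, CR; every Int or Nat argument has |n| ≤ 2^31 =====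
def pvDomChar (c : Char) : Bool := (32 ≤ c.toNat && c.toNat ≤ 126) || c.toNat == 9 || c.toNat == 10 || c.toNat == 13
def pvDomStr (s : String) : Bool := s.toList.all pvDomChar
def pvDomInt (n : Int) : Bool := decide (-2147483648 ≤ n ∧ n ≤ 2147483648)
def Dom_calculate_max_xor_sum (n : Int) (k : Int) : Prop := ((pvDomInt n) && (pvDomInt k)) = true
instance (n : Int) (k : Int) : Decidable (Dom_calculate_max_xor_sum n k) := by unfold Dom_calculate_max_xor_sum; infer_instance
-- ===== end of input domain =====

-- B replaces A's power-of-two accumulation loop with the closed form (1 << n.bit_length()) - 1 (0 for n ≤ 0); objective: idiomatic.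

-- ===== PORT A =====
-- the while loop: while (1 << power) <= n: max_xor_sum += (1 << power); power += 1
-- (1 << power) is written (2 : Int) ^ power, which is exact for Python's left shift of 1
def pvLoopA (n : Int) (power : Nat) (acc : Int) : Int :=
  if (2 : Int) ^ power ≤ n then pvLoopA n (power + 1) (acc + (2 : Int) ^ power) else acc
termination_by n.toNat + 1 - 2 ^ power
decreasing_by
  rename_i h
  have h1 : (2 : Int) ^ power ≤ (n.toNat : Int) := by
    have hp : (0 : Int) < 2 ^ power := by positivity
    have ht : ((n.toNat : Int)) = n := Int.toNat_of_nonneg (by omega)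
    omega
  have h2 : 2 ^ power ≤ n.toNat := by exact_mod_cast h1
  have h4 : 0 < 2 ^ power := Nat.two_pow_pos power
  omega

def calculate_max_xor_sum (n : Int) (k : Int) : Int :=
  if k = 1 then n else pvLoopA n 0 0

-- ===== PORT B =====
-- n.bit_length() for n > 0 is Nat.size of n.toNat
def calculate_max_xor_sum_alt (n : Int) (k : Int) : Int :=
  if k = 1 then n
  else if n > 0 then (2 : Int) ^ (n.toNat.size) - 1 else 0

-- ===== PRECONDITION & SPEC =====
def Spec_calculate_max_xor_sum (n : Int) (k : Int) (out : Int) : Prop := out = calculate_max_xor_sum_alt n k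
instance (n : Int) (k : Int) (out : Int) : Decidable (Spec_calculate_max_xor_sum n k out) := by unfold Spec_calculate_max_xor_sum; infer_instance

-- ===== CLAIM (what is proved, stated in full; the proofs are below) =====
def Claim_equal_calculate_max_xor_sum : Prop := ∀ (n : Int) (k : Int), Dom_calculate_max_xor_sum n k → Spec_calculate_max_xor_sum n k (calculate_max_xor_sum n k)

-- ===== LEMMAS AND PROOFS =====

-- loop invariant: pvLoopA adds 2^power + … + 2^(size-1) = 2^size - 2^power when it runs at all
theorem pvLoopA_eq (n : Int) (power : Nat) (acc : Int) :
    pvLoopA n power acc =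
      acc + (if (2 : Int) ^ power ≤ n then (2 : Int) ^ (n.toNat.size) - 2 ^ power else 0) := by
  fun_induction pvLoopA n power acc with
  | case1 power acc h ih =>
    rw [ih]
    have h1 : (2 : Int) ^ power ≤ (n.toNat : Int) := by
      have hp : (0 : Int) < 2 ^ power := by positivity
      have ht : ((n.toNat : Int)) = n := Int.toNat_of_nonneg (by omega)
      omega
    have h2 : 2 ^ power ≤ n.toNat := by exact_mod_cast h1
    by_cases h' : (2 : Int) ^ (power + 1) ≤ n
    · simp only [if_pos h', if_pos h]
      have : (2 : Int) ^ (power + 1) = 2 * 2 ^ power := by ring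
      ring
    · simp only [if_neg h', if_pos h]
      -- here 2^power ≤ n < 2^(power+1), so size n.toNat = power + 1
      have h3 : n.toNat < 2 ^ (power + 1) := by
        have : (n : Int) < 2 ^ (power + 1) := by omega
        have hn : ((n.toNat : Int)) ≤ n := by omega
        have : ((n.toNat : Int)) < ((2 ^ (power + 1) : Nat) : Int) := by push_cast; omega
        exact_mod_cast this
      have hlt : power < n.toNat.size := Nat.lt_size.mpr h2
      have hle : n.toNat.size ≤ power + 1 := Nat.size_le.mpr h3
      have hsz : n.toNat.size = power + 1 := by omega
      rw [hsz]
      have : (2 : Int) ^ (power + 1) = 2 * 2 ^ power := by ring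
      ring
  | case2 power acc h => simp [h]

-- ===== VERDICT (by name: the statement is the Claim_ definition above) =====
theorem calculate_max_xor_sum_spec : Claim_equal_calculate_max_xor_sum := by
  intro n k _
  unfold Spec_calculate_max_xor_sum calculate_max_xor_sum calculate_max_xor_sum_alt
  by_cases hk : k = 1
  · simp [hk]
  · simp only [if_neg hk]
    rw [pvLoopA_eq]
    by_cases hn : n > 0
    · have h0 : (2 : Int) ^ (0 : Nat) ≤ n := by norm_num; omega
      rw [if_pos hn, if_pos h0]; norm_num
    · have h0 : ¬ (2 : Int) ^ (0 : Nat) ≤ n := by norm_num; omega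
      rw [if_neg hn, if_neg h0]; norm_num
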